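-- pv_equiv track=rewrite | github.com/luisfsts/KPIAlgebras | KPIAlgebras/util/util.py | is_atomic
-- ===== SOURCE A (Python) =====
-- def is_atomic(event_label, log):
--     start = None
--     complete = None
--     for trace in log:
--         if start is None or not start:
--             start = [event for event in trace if
--                      event["concept:name"] == event_label and event["lifecycle:transition"] == "start"]
--         if complete is None or not complete:
--             complete = [event for event in trace if
--                         event["concept:name"] == event_label and event["lifecycle:transition"] == "complete"]
--         if start and complete:
--             break
--
--     return True if not start or not complete else False
-- ===== SOURCE B (Python) =====
-- def is_atomic(event_label, log):
--     has_start = any(event["concept:name"] == event_label and event["lifecycle:transition"] == "start"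
--                     for trace in log for event in trace)
--     has_complete = any(event["concept:name"] == event_label and event["lifecycle:transition"] == "complete"
--                        for trace in log for event in trace)
--     return not (has_start and has_complete)
-- ===== Notes on version B (the rewrite author's own statement) =====
-- stated objective: simpler
-- what changed: Replaces A's single stateful trace-by-trace pass (two Optional lists rebuilt per trace with an early break) by two independent short-circuiting boolean any-scans over the flattened log, returning not (has_start and has_complete).
import Mathlib
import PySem

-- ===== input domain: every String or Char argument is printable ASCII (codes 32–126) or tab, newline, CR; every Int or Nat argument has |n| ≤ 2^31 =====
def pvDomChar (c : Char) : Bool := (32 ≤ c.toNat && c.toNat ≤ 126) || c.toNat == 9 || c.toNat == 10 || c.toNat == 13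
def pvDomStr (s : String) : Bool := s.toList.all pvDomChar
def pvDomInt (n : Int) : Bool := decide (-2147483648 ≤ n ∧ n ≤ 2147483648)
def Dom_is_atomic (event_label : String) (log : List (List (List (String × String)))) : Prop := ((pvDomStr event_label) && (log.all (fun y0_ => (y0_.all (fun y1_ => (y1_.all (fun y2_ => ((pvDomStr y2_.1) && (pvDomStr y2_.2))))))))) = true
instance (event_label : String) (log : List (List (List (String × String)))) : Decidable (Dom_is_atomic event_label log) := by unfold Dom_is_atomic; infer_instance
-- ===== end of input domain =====

-- B replaces A's single stateful trace-by-trace pass (with an early break) by two independent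
-- short-circuiting boolean scans; objective: simpler.


-- ===== PORT A =====
-- event["concept:name"] == event_label and event["lifecycle:transition"] == tr
-- (exact on Pre_, where both accessed keys are present so no KeyError is raised)
def pvMatch (event_label tr : String) (e : List (String × String)) : Bool :=
  ((PySem.Dict.mk e).get? "concept:name" == some event_label) &&
  ((PySem.Dict.mk e).get? "lifecycle:transition" == some tr)

-- Python truthiness of the Optional-list variables: None and [] are falsy
def pvTruthy {α : Type} : Option (List α) → Bool
  | none => false
  | some l => !l.isEmpty

-- the for-loop over traces, state = (start, complete), with the break
def pvLoopA (event_label : String) :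
    List (List (List (String × String))) →
    Option (List (List (String × String))) → Option (List (List (String × String))) →
    Option (List (List (String × String))) × Option (List (List (String × String)))
  | [], s, c => (s, c)
  | t :: rest, s, c =>
      let s' := if pvTruthy s = false then some (t.filter (pvMatch event_label "start")) else s
      let c' := if pvTruthy c = false then some (t.filter (pvMatch event_label "complete")) else c
      if pvTruthy s' && pvTruthy c' then (s', c') else pvLoopA event_label rest s' c'

def is_atomic (event_label : String) (log : List (List (List (String × String)))) : Bool :=
  let sc := pvLoopA event_label log none none
  if !pvTruthy sc.1 || !pvTruthy sc.2 then true else false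

-- ===== PORT B =====
def is_atomic_alt (event_label : String) (log : List (List (List (String × String)))) : Bool :=
  let has_start := log.any (fun t => t.any (pvMatch event_label "start"))
  let has_complete := log.any (fun t => t.any (pvMatch event_label "complete"))
  !(has_start && has_complete)

-- ===== PRECONDITION & SPEC =====
-- Pre_ excludes inputs where an event accessed by the scan lacks "concept:name", or lacks
-- "lifecycle:transition" while its "concept:name" matches the label: there Python A raises KeyError.
-- It is slightly narrower than A's exact return set: A's early break (or an already-found start)
-- can skip a malformed later event; B's short-circuiting scans skip it equally, see cites.
def Pre_is_atomic (event_label : String) (log : List (List (List (String × String)))) : Prop :=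
  ∀ t ∈ log, ∀ e ∈ t,
    ((PySem.Dict.mk e).get? "concept:name").isSome = true ∧
    ((PySem.Dict.mk e).get? "concept:name" = some event_label →
      ((PySem.Dict.mk e).get? "lifecycle:transition").isSome = true)

instance (event_label : String) (log : List (List (List (String × String)))) : Decidable (Pre_is_atomic event_label log) := by unfold Pre_is_atomic; infer_instance

def pvWitness_is_atomic : String × (List (List (List (String × String)))) :=
  ("a", [[[("concept:name", "a"), ("lifecycle:transition", "start")],
          [("concept:name", "a"), ("lifecycle:transition", "complete")]]])

def Spec_is_atomic (event_label : String) (log : List (List (List (String × String)))) (out : Bool) : Prop := out = is_atomic_alt event_label log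
instance (event_label : String) (log : List (List (List (String × String)))) (out : Bool) : Decidable (Spec_is_atomic event_label log out) := by unfold Spec_is_atomic; infer_instance

-- ===== CLAIM (what is proved, stated in full; the proofs are below) =====
def Claim_equal_is_atomic : Prop := ∀ (event_label : String) (log : List (List (List (String × String)))), Dom_is_atomic event_label log → Pre_is_atomic event_label log → Spec_is_atomic event_label log (is_atomic event_label log)

-- ===== LEMMAS AND PROOFS =====

-- the truthiness of each component after one update step
theorem pvStep_truthy (p : List (String × String) → Bool)
    (s : Option (List (List (String × String)))) (t : List (List (String × String))) :
    pvTruthy (if pvTruthy s = false then some (t.filter p) else s) = (pvTruthy s || t.any p) := by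
  by_cases h : pvTruthy s = false
  · rw [if_pos h, h, Bool.false_or]
    show (!(t.filter p).isEmpty) = t.any p
    induction t with
    | nil => rfl
    | cons x xs ih =>
      by_cases hp : p x = true
      · simp [hp]
      · simp only [Bool.not_eq_true] at hp
        simp [hp, ih]
  · rw [if_neg h]
    simp only [Bool.not_eq_false] at h
    rw [h, Bool.true_or]

-- loop invariant: the final truthiness of start/complete is "already truthy, or some trace matches"
theorem pvLoopA_truthy (event_label : String) (log : List (List (List (String × String))))
    (s c : Option (List (List (String × String)))) :
    pvTruthy (pvLoopA event_label log s c).1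
        = (pvTruthy s || log.any (fun t => t.any (pvMatch event_label "start"))) ∧
    pvTruthy (pvLoopA event_label log s c).2
        = (pvTruthy c || log.any (fun t => t.any (pvMatch event_label "complete"))) := by
  induction log generalizing s c with
  | nil => simp [pvLoopA]
  | cons t rest ih =>
    simp only [pvLoopA, List.any_cons]
    by_cases hb :
        (pvTruthy (if pvTruthy s = false then some (t.filter (pvMatch event_label "start")) else s) &&
         pvTruthy (if pvTruthy c = false then some (t.filter (pvMatch event_label "complete")) else c)) = true
    · simp only [hb, if_true]
      have hs := pvStep_truthy (pvMatch event_label "start") s t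
      have hc := pvStep_truthy (pvMatch event_label "complete") c t
      rw [Bool.and_eq_true, hs, hc] at hb
      constructor
      · show pvTruthy (if pvTruthy s = false then some (t.filter (pvMatch event_label "start")) else s) = _
        rw [hs, ← Bool.or_assoc, hb.1, Bool.true_or]
      · show pvTruthy (if pvTruthy c = false then some (t.filter (pvMatch event_label "complete")) else c) = _
        rw [hc, ← Bool.or_assoc, hb.2, Bool.true_or]
    · rw [if_neg hb]
      obtain ⟨ih1, ih2⟩ := ih
        (if pvTruthy s = false then some (t.filter (pvMatch event_label "start")) else s)
        (if pvTruthy c = false then some (t.filter (pvMatch event_label "complete")) else c)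
      rw [ih1, ih2, pvStep_truthy, pvStep_truthy]
      constructor <;> rw [Bool.or_assoc]

-- ===== VERDICT (by name: the statement is the Claim_ definition above) =====
theorem is_atomic_spec : Claim_equal_is_atomic := by
  intro event_label log _ _
  unfold Spec_is_atomic is_atomic is_atomic_alt
  obtain ⟨h1, h2⟩ := pvLoopA_truthy event_label log none none
  rw [show (∀ x y : Bool, (if (!x || !y) = true then true else false) = !(x && y)) from by decide]
  rw [h1, h2]
  cases log.any (fun t => t.any (pvMatch event_label "start")) <;>
    cases log.any (fun t => t.any (pvMatch event_label "complete")) <;> simp [pvTruthy]
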